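-- pv_equiv track=rewrite | github.com/kennedy0/AdventOfCode2021 | aoc/day_10/day_10.py | autocomplete_score
-- ===== SOURCE A (Python) =====
-- def autocomplete_score(characters: str) -> int:
--     points = {
--         ')': 1,
--         ']': 2,
--         '}': 3,
--         '>': 4,
--     }
--     score = 0
--     for c in characters:
--         score *= 5
--         score += points[c]
--     return score
-- ===== SOURCE B (Python) =====
-- def autocomplete_score(characters: str) -> int:
--     points = {
--         ')': 1,
--         ']': 2,
--         '}': 3,
--         '>': 4,
--     }
--     return sum(points[c] * 5**i for i, c in enumerate(reversed(characters)))
-- ===== Notes on version B (the rewrite author's own statement) =====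
-- stated objective: alternative
-- what changed: Replaces Horner's running multiply-add accumulator with a weighted positional sum over the reversed string (digit * 5**index).
import Mathlib
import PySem

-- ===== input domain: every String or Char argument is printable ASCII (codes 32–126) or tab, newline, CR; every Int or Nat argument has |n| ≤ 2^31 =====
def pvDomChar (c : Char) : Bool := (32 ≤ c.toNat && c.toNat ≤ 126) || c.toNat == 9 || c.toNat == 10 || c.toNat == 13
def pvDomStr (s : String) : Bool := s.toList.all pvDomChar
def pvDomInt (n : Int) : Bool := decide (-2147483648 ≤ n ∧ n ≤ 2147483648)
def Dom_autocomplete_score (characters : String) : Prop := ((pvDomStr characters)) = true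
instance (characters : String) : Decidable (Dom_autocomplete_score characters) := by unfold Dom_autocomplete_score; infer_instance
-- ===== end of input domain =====

-- B computes the same base-5 value as a weighted positional sum over the reversed string
-- instead of A's Horner-style running accumulator; alternative decomposition, same cost.

-- ===== PORT A =====
-- the points dict of A (getD's default is only reached outside Pre_, where Python A raises KeyError)
def pvPointsDict : PySem.Dict Char Int :=
  PySem.Dict.ofList [(')', 1), (']', 2), ('}', 3), ('>', 4)]

def autocomplete_score (characters : String) : Int :=
  characters.toList.foldl (fun score c => score * 5 + pvPointsDict.getD c 0) 0

-- ===== PORT B =====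
def autocomplete_score_alt (characters : String) : Int :=
  (PySem.List.enumerate characters.toList.reverse 0).foldl
    (fun s p => s + pvPointsDict.getD p.2 0 * 5 ^ p.1.toNat) 0

-- ===== PRECONDITION & SPEC =====
-- Pre_ excludes exactly the strings containing a character other than the four closing brackets — Python A raises KeyError there.
def Pre_autocomplete_score (characters : String) : Prop :=
  (characters.toList.all (fun c => c == ')' || c == ']' || c == '}' || c == '>')) = true
instance (characters : String) : Decidable (Pre_autocomplete_score characters) := by
  unfold Pre_autocomplete_score; infer_instance
def pvWitness_autocomplete_score : String := ")"

def Spec_autocomplete_score (characters : String) (out : Int) : Prop := out = autocomplete_score_alt characters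
instance (characters : String) (out : Int) : Decidable (Spec_autocomplete_score characters out) := by unfold Spec_autocomplete_score; infer_instance

-- ===== CLAIM (what is proved, stated in full; the proofs are below) =====
def Claim_equal_autocomplete_score : Prop := ∀ (characters : String), Dom_autocomplete_score characters → Pre_autocomplete_score characters → Spec_autocomplete_score characters (autocomplete_score characters)

-- ===== LEMMAS AND PROOFS =====

-- mathematical value of a little-endian digit list (head is the 5^0 digit)
def pvVal (f : Char → Int) : List Char → Int
  | [] => 0
  | c :: cs => f c + 5 * pvVal f cs

theorem pvVal_append (f : Char → Int) (r : List Char) (c : Char) :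
    pvVal f (r ++ [c]) = pvVal f r + f c * 5 ^ r.length := by
  induction r with
  | nil => simp [pvVal]
  | cons y ys ih => simp [pvVal, ih]; ring

theorem pvEnum_foldl (f : Char → Int) (r : List Char) :
    ∀ (k : Nat) (init : Int),
      (PySem.List.enumerate r (k : Int)).foldl (fun s p => s + f p.2 * 5 ^ p.1.toNat) init
        = init + 5 ^ k * pvVal f r := by
  induction r with
  | nil => intro k init; simp [PySem.List.enumerate_nil, pvVal]
  | cons x rest ih =>
      intro k init
      have h1 : ((k : Int) + 1) = ((k + 1 : Nat) : Int) := by push_cast; ring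
      rw [PySem.List.enumerate_cons, List.foldl_cons, h1, ih]
      simp [pvVal, Int.toNat_natCast]
      ring

theorem pvHorner (f : Char → Int) (l : List Char) :
    ∀ (a : Int),
      l.foldl (fun score c => score * 5 + f c) a
        = a * 5 ^ l.length + pvVal f l.reverse := by
  induction l with
  | nil => intro a; simp [pvVal]
  | cons c cs ih =>
      intro a
      rw [List.foldl_cons, ih]
      simp [List.reverse_cons, pvVal_append]
      ring

-- ===== VERDICT (by name: the statement is the Claim_ definition above) =====
theorem autocomplete_score_spec : Claim_equal_autocomplete_score := by
  intro characters _ _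
  show autocomplete_score characters = autocomplete_score_alt characters
  unfold autocomplete_score autocomplete_score_alt
  rw [pvHorner (fun c => pvPointsDict.getD c 0) characters.toList 0]
  have := pvEnum_foldl (fun c => pvPointsDict.getD c 0) characters.toList.reverse 0 0
  simp at this ⊢
  simpa using this.symm
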